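-- pv_equiv track=rewrite | github.com/dunamismax/scryfall-discord-bot | src/mtg_card_bot/bot.py | _has_filter_parameters
-- ===== SOURCE A (Python) =====
-- def _has_filter_parameters(query: str) -> bool:
--     """Check if the query contains Scryfall filter syntax."""
--     essential_filters = [
--         "e:",
--         "s:",
--         "set:",
--         "frame:",
--         "border:",
--         "is:",
--         "rarity:",
--         "r:",
--         "cn:",
--         "number:",
--         "c:",
--         "color:",
--         "id:",
--         "t:",
--         "type:",
--         "o:",
--         "oracle:",
--         "pow:",
--         "tou:",
--         "cmc:",
--         "mv:",
--         "f:",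
--         "format:",
--     ]
--
--     lower_query = query.lower()
--     return any(filter_param in lower_query for filter_param in essential_filters)
-- ===== SOURCE B (Python) =====
-- def _has_filter_parameters(query: str) -> bool:
--     """Check if the query contains Scryfall filter syntax."""
--     # Every filter token ends in a colon.  A token occurs in the query iff some
--     # colon in the lowered query is immediately preceded by one of these suffixes
--     # (the one-letter filters e,s,r,c,t,o,f subsume longer tokens ending in them).
--     suffixes = ("e", "s", "r", "c", "t", "o", "f", "rarity", "cn", "id", "pow", "tou", "mv")
--     lq = query.lower()
--     return any(ch == ":" and lq[:i].endswith(suffixes) for i, ch in enumerate(lq))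
-- ===== Notes on version B (the rewrite author's own statement) =====
-- stated objective: alternative
-- what changed: Instead of scanning the query once per each of 23 filter tokens, B scans the lowercased query a single time and, at each colon character, checks whether the preceding text ends in one of 13 suffixes (the one-letter filters subsume the longer tokens that end in them).
import Mathlib
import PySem

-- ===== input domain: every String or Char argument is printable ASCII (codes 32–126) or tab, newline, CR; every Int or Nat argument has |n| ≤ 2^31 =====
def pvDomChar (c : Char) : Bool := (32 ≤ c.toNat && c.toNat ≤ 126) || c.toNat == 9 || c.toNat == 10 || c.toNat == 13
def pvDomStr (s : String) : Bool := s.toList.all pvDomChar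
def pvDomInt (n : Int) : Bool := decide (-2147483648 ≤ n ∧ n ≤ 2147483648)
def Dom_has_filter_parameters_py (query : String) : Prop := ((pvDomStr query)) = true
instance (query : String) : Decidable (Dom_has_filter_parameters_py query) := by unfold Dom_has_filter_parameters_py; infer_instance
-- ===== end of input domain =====

-- B replaces the 23-token per-token substring scans by a single scan of the
-- lowered query that tests, at each ':', whether the preceding text ends in one
-- of 13 suffixes (a different algorithm of similar cost).


-- ===== PORT A =====
def has_filter_parameters_py (query : String) : Bool :=
  let essential_filters : List String :=
    ["e:", "s:", "set:", "frame:", "border:", "is:", "rarity:", "r:", "cn:",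
     "number:", "c:", "color:", "id:", "t:", "type:", "o:", "oracle:", "pow:",
     "tou:", "cmc:", "mv:", "f:", "format:"]
  let lower_query := PySem.Str.lower query
  essential_filters.any (fun filter_param => PySem.Str.isIn filter_param lower_query)

-- ===== PORT B =====
-- suffixes (as lists of chars, matching Source B's tuple)
def pvSuffixes : List (List Char) :=
  [['e'], ['s'], ['r'], ['c'], ['t'], ['o'], ['f'],
   ['r','a','r','i','t','y'], ['c','n'], ['i','d'], ['p','o','w'], ['t','o','u'], ['m','v']]

def has_filter_parameters_py_alt (query : String) : Bool :=
  let lq := PySem.Chars.lower query.toList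
  -- any(ch == ":" and lq[:i].endswith(suffixes) for i, ch in enumerate(lq));
  -- i ≥ 0 always here, so the slice lq[:i] is List.take i.toNat
  (PySem.List.enumerate lq).any (fun p =>
    p.2 == ':' && pvSuffixes.any (fun sfx => PySem.Chars.endswith (lq.take p.1.toNat) sfx))

-- ===== PRECONDITION & SPEC =====
def Spec_has_filter_parameters_py (query : String) (out : Bool) : Prop := out = has_filter_parameters_py_alt query
instance (query : String) (out : Bool) : Decidable (Spec_has_filter_parameters_py query out) := by unfold Spec_has_filter_parameters_py; infer_instance

-- ===== CLAIM (what is proved, stated in full; the proofs are below) =====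
def Claim_equal_has_filter_parameters_py : Prop := ∀ (query : String), Dom_has_filter_parameters_py query → Spec_has_filter_parameters_py query (has_filter_parameters_py query)

-- ===== LEMMAS AND PROOFS =====

-- A token "pref:" is an infix of s iff some position k of s holds ':' and pref is a suffix of s.take k.
theorem pv_infix_colon_iff (pref s : List Char) :
    (pref ++ [':']) <:+: s ↔ ∃ k : Nat, ∃ h : k < s.length, s[k] = ':' ∧ pref <:+ s.take k := by
  constructor
  · rintro ⟨t, u, hs⟩
    refine ⟨(t ++ pref).length, ?_, ?_, ?_⟩
    · subst hs; simp
    · subst hs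
      have h2 : (t ++ (pref ++ [':']) ++ u) = (t ++ pref) ++ (':' :: u) := by simp
      have hb : (t ++ pref).length < (t ++ (pref ++ [':']) ++ u).length := by simp
      have hq : (t ++ (pref ++ [':']) ++ u)[(t ++ pref).length]? = some ':' := by
        rw [h2, List.getElem?_append_right (le_refl _)]
        simp
      rw [List.getElem?_eq_getElem hb] at hq
      exact Option.some.inj hq
    · subst hs
      have : (t ++ (pref ++ [':']) ++ u) = (t ++ pref) ++ (':' :: u) := by simp
      rw [this, List.take_left]
      exact ⟨t, rfl⟩
  · rintro ⟨k, hk, hc, t, ht⟩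
    refine ⟨t, s.drop (k + 1), ?_⟩
    have hdrop : s.drop k = ':' :: s.drop (k + 1) := by
      rw [List.drop_eq_getElem_cons hk, hc]
    have hsplit : s = s.take k ++ s.drop k := (List.take_append_drop k s).symm
    rw [← ht, hdrop] at hsplit
    conv_rhs => rw [hsplit]
    simp

-- B = true iff some position of the lowered query holds ':' preceded by one of the suffixes
theorem pv_alt_iff (query : String) :
    has_filter_parameters_py_alt query = true ↔
      ∃ k : Nat, ∃ h : k < (PySem.Chars.lower query.toList).length,
        (PySem.Chars.lower query.toList)[k] = ':' ∧
        ∃ m ∈ pvSuffixes, m <:+ (PySem.Chars.lower query.toList).take k := by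
  unfold has_filter_parameters_py_alt
  simp only [List.any_eq_true, PySem.List.mem_enumerate_iff]
  constructor
  · rintro ⟨p, ⟨k, hk, rfl⟩, hcond⟩
    simp only [Bool.and_eq_true, beq_iff_eq, List.any_eq_true] at hcond
    obtain ⟨hc, m, hm, hend⟩ := hcond
    rw [PySem.Chars.endswith_iff] at hend
    refine ⟨k, hk, hc, m, hm, ?_⟩
    simpa using hend
  · rintro ⟨k, hk, hc, m, hm, hsfx⟩
    refine ⟨((0 : Int) + k, (PySem.Chars.lower query.toList)[k]), ⟨k, hk, rfl⟩, ?_⟩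
    simp only [Bool.and_eq_true, beq_iff_eq, List.any_eq_true]
    refine ⟨hc, m, hm, ?_⟩
    rw [PySem.Chars.endswith_iff]
    simpa using hsfx

-- the 23 filter tokens of A, without their trailing ':', in A's order
def pvPrefixes : List (List Char) :=
  [['e'],
   ['s'],
   ['s','e','t'],
   ['f','r','a','m','e'],
   ['b','o','r','d','e','r'],
   ['i','s'],
   ['r','a','r','i','t','y'],
   ['r'],
   ['c','n'],
   ['n','u','m','b','e','r'],
   ['c'],
   ['c','o','l','o','r'],
   ['i','d'],
   ['t'],
   ['t','y','p','e'],
   ['o'],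
   ['o','r','a','c','l','e'],
   ['p','o','w'],
   ['t','o','u'],
   ['c','m','c'],
   ['m','v'],
   ['f'],
   ['f','o','r','m','a','t']]

-- A = true iff some full token "pref:" is an infix of the lowered query
theorem pv_a_iff (query : String) :
    has_filter_parameters_py query = true ↔
      ∃ pref ∈ pvPrefixes, (pref ++ [':']) <:+: PySem.Chars.lower query.toList := by
  unfold has_filter_parameters_py pvPrefixes
  simp [PySem.Chars.isIn_iff_infix]

-- every A-prefix ends in one of B's suffixes
theorem pv_cover : ∀ pref ∈ pvPrefixes, ∃ m ∈ pvSuffixes, m <:+ pref := by decide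

-- every B-suffix is itself an A-prefix
theorem pv_suffixes_sub : ∀ m ∈ pvSuffixes, m ∈ pvPrefixes := by decide

-- ===== VERDICT (by name: the statement is the Claim_ definition above) =====
theorem has_filter_parameters_py_spec : Claim_equal_has_filter_parameters_py := by
  intro query _
  unfold Spec_has_filter_parameters_py
  apply Bool.coe_iff_coe.mp
  rw [pv_a_iff, pv_alt_iff]
  constructor
  · rintro ⟨pref, hmem, hinf⟩
    rw [pv_infix_colon_iff] at hinf
    obtain ⟨k, hk, hc, hsfx⟩ := hinf
    obtain ⟨m, hm, hmp⟩ := pv_cover pref hmem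
    exact ⟨k, hk, hc, m, hm, hmp.trans hsfx⟩
  · rintro ⟨k, hk, hc, m, hm, hsfx⟩
    refine ⟨m, pv_suffixes_sub m hm, ?_⟩
    rw [pv_infix_colon_iff]
    exact ⟨k, hk, hc, hsfx⟩
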